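-- pv_equiv track=rewrite | github.com/ggEx86/PyNetworkCommunicationUDP | packet.py | parse
-- ===== SOURCE A (Python) =====
-- def parse(data):
-- 	get_key = False
-- 	get_value = False
-- 	keys = []
-- 	values = []
-- 	buff = ''
--
-- 	for ch in data:
-- 		if ch == '<':
-- 			get_key, get_value = True, False
-- 			if buff: values.append(buff)
-- 			buff = ''
-- 		elif ch == '>':
-- 			get_key, get_value = False, True
-- 			if buff: keys.append(buff)
-- 			buff = ''
-- 		else: buff += ch
--
-- 	dict_list = {}
-- 	for key, value in zip(keys, values):
-- 		dict_list[key] = value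
-- 	return dict_list
-- ===== SOURCE B (Python) =====
-- import re
--
-- def parse(data):
--     # Tokenize once: re.split with a capturing group yields text and single-delimiter
--     # tokens alternating; the final text token is never terminated, so it is unused.
--     tokens = re.split(r'([<>])', data)
--     keys = []
--     values = []
--     for i in range(1, len(tokens), 2):
--         text = tokens[i - 1]
--         if text:
--             (values if tokens[i] == '<' else keys).append(text)
--     return dict(zip(keys, values))
-- ===== Notes on version B (the rewrite author's own statement) =====
-- stated objective: faster
-- what changed: Replaces A's char-by-char state machine (flag booleans, growing buffer, per-char flush) with one re.split on the delimiters followed by a pairwise classification of whole text segments.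
import Mathlib
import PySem

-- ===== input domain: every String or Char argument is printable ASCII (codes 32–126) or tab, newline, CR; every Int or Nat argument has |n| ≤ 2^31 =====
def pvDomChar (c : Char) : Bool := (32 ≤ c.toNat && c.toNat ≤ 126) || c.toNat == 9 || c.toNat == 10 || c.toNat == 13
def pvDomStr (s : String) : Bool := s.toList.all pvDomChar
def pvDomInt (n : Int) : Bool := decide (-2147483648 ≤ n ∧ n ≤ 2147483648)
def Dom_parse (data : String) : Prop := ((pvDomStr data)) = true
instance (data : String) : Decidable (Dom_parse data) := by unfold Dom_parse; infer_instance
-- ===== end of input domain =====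

-- B re-tokenizes the string once (re.split on the delimiters) and classifies whole
-- segments pairwise instead of A's char-by-char state machine; same return value.

-- ===== PORT A =====
-- A's loop state: (get_key, get_value, keys, values, buff); buff kept as List Char
def parseStepA (st : Bool × Bool × List String × List String × List Char) (ch : Char) :
    Bool × Bool × List String × List String × List Char :=
  let (gk, gv, ks, vs, buff) := st
  if ch = '<' then
    (true, false, ks, (if buff ≠ [] then vs ++ [String.ofList buff] else vs), [])
  else if ch = '>' then
    (false, true, (if buff ≠ [] then ks ++ [String.ofList buff] else ks), vs, [])
  else
    (gk, gv, ks, vs, buff ++ [ch])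

def parse (data : String) : List (String × String) :=
  let st := data.toList.foldl parseStepA (false, false, [], [], [])
  let ks := st.2.2.1
  let vs := st.2.2.2.1
  (((ks.zip vs).foldl (fun d kv => d.insert kv.1 kv.2)
    (PySem.Dict.empty : PySem.Dict String String)).items)

-- ===== PORT B =====
-- hand port of re.split(r'([<>])', data): exact for this pattern — alternating
-- text tokens and single-delimiter tokens, first and last tokens are text
def tokensB : List Char → List (List Char)
  | [] => [[]]
  | c :: cs =>
    if c = '<' ∨ c = '>' then [] :: [c] :: tokensB cs
    else
      match tokensB cs with
      | [] => [[c]]          -- unreachable: tokensB never returns []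
      | t :: rest => (c :: t) :: rest

-- the loop over odd indices: consume (text, delimiter) pairs; a lone final text token is dropped
def classifyB : List String → List String → List (List Char) → List String × List String
  | ks, vs, t :: d :: rest =>
    if d = ['<'] then classifyB ks (if t ≠ [] then vs ++ [String.ofList t] else vs) rest
    else classifyB (if t ≠ [] then ks ++ [String.ofList t] else ks) vs rest
  | ks, vs, _ => (ks, vs)

def parse_alt (data : String) : List (String × String) :=
  let kv := classifyB [] [] (tokensB data.toList)
  (PySem.Dict.ofList (kv.1.zip kv.2)).items

-- ===== PRECONDITION & SPEC =====
def Spec_parse (data : String) (out : List (String × String)) : Prop := out = parse_alt data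
instance (data : String) (out : List (String × String)) : Decidable (Spec_parse data out) := by unfold Spec_parse; infer_instance

-- ===== CLAIM (what is proved, stated in full; the proofs are below) =====
def Claim_equal_parse : Prop := ∀ (data : String), Dom_parse data → Spec_parse data (parse data)

-- ===== LEMMAS AND PROOFS =====

-- prepend a buffer onto the first (text) token of a token list
def consTok (b : List Char) : List (List Char) → List (List Char)
  | [] => [b]
  | t :: rest => (b ++ t) :: rest

theorem consTok_consTok (b t : List Char) (tl : List (List Char)) :
    consTok b (consTok t tl) = consTok (b ++ t) tl := by
  cases tl <;> simp [consTok]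

-- core invariant: A's char loop from any state equals B's pairwise classification
-- of the token list with the pending buffer prepended
theorem tokensB_ne_nil (cs : List Char) : tokensB cs ≠ [] := by
  cases cs with
  | nil => simp [tokensB]
  | cons c cs =>
    simp only [tokensB]
    split
    · simp
    · cases h : tokensB cs <;> simp

theorem consTok_nil_of_ne_nil (tl : List (List Char)) (h : tl ≠ []) : consTok [] tl = tl := by
  cases tl with
  | nil => exact absurd rfl h
  | cons t rest => simp [consTok]

-- core invariant: A's char loop from any state equals B's pairwise classification
-- of the token list with the pending buffer prepended
theorem loop_eq_classify (cs : List Char) :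
    ∀ (gk gv : Bool) (ks vs : List String) (buff : List Char),
      (let st := cs.foldl parseStepA (gk, gv, ks, vs, buff)
       (st.2.2.1, st.2.2.2.1)) = classifyB ks vs (consTok buff (tokensB cs)) := by
  induction cs with
  | nil =>
    intro gk gv ks vs buff
    simp [tokensB, consTok, classifyB]
  | cons c cs ih =>
    intro gk gv ks vs buff
    by_cases h1 : c = '<'
    · subst h1
      simp only [tokensB, List.foldl_cons, parseStepA, true_or, ite_true, consTok, classifyB,
        List.append_nil]
      rw [← consTok_nil_of_ne_nil (tokensB cs) (tokensB_ne_nil cs)]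
      exact ih _ _ _ _ _
    · by_cases h2 : c = '>'
      · subst h2
        simp only [tokensB, List.foldl_cons, parseStepA, or_true, ite_true, consTok, classifyB,
          List.append_nil]
        rw [if_neg h1, if_neg (show ¬(['>'] = ['<']) by decide)]
        rw [← consTok_nil_of_ne_nil (tokensB cs) (tokensB_ne_nil cs)]
        exact ih _ _ _ _ _
      · have hd : ¬ (c = '<' ∨ c = '>') := by tauto
        simp only [tokensB, List.foldl_cons, parseStepA, if_neg h1, if_neg h2, if_neg hd]
        rcases h : tokensB cs with _ | ⟨t, rest⟩
        · exact absurd h (tokensB_ne_nil cs)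
        · have := ih gk gv ks vs (buff ++ [c])
          rw [h] at this
          simpa [consTok, consTok_consTok] using this

theorem dict_build_eq (ps : List (String × String)) :
    ps.foldl (fun d kv => d.insert kv.1 kv.2) (PySem.Dict.empty : PySem.Dict String String)
      = PySem.Dict.ofList ps := by
  rfl

-- ===== VERDICT (by name: the statement is the Claim_ definition above) =====
theorem parse_spec : Claim_equal_parse := by
  intro data _
  show parse data = parse_alt data
  unfold parse parse_alt
  have h := loop_eq_classify data.toList false false [] [] []
  rw [consTok_nil_of_ne_nil _ (tokensB_ne_nil data.toList)] at h
  simp only at h ⊢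
  rw [dict_build_eq]
  have h1 : (data.toList.foldl parseStepA (false, false, [], [], [])).2.2.1
      = (classifyB [] [] (tokensB data.toList)).1 := congrArg Prod.fst h
  have h2 : (data.toList.foldl parseStepA (false, false, [], [], [])).2.2.2.1
      = (classifyB [] [] (tokensB data.toList)).2 := congrArg Prod.snd h
  rw [h1, h2]
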